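-- pv_equiv track=rewrite | github.com/xianyvxxx/LCG-HGNN | ke_graph_s.py | extract_before_delimiters
-- ===== SOURCE A (Python) =====
-- def extract_before_delimiters(input_list):
--     result = []
--     for item in input_list:
--         pos_colon = item.find(':')
--         pos_tilde = item.find('~')
--
--         if pos_colon != -1 and (pos_tilde == -1 or pos_colon < pos_tilde):
--             result.append(item[:pos_colon])
--         elif pos_tilde != -1:
--             result.append(item[:pos_tilde])
--         else:
--             result.append(item)
--
--     return result
-- ===== SOURCE B (Python) =====
-- def extract_before_delimiters(input_list):
--     result = []
--     for item in input_list: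
--         prefix = []
--         for ch in item:
--             if ch == ':' or ch == '~':
--                 break
--             prefix.append(ch)
--         result.append(''.join(prefix))
--     return result
-- ===== Notes on version B (the rewrite author's own statement) =====
-- stated objective: alternative
-- what changed: B replaces A's two separate find(':')/find('~') scans plus the positional-comparison branch by a single left-to-right scan per item that stops at the first delimiter (take-while), so the branch logic disappears.
import Mathlib
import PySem

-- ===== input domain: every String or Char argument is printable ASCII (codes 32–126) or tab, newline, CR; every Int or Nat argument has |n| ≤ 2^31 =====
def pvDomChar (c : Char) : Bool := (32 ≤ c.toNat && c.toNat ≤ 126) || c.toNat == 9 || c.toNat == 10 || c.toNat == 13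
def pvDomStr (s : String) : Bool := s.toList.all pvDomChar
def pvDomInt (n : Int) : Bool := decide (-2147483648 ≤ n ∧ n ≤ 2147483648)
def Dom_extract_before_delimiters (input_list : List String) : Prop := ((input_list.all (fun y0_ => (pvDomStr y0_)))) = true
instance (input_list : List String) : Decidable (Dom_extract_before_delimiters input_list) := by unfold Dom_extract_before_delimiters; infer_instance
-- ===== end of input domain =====

-- B replaces A's two item.find scans plus the positional-comparison branch by one
-- left-to-right scan per item that stops at the first ':' or '~' (objective: alternative).

-- ===== PORT A =====
def extract_before_delimiters (input_list : List String) : List String :=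
  input_list.foldl (fun result item =>
    let pos_colon := PySem.Str.find item ":"
    let pos_tilde := PySem.Str.find item "~"
    if pos_colon ≠ -1 ∧ (pos_tilde = -1 ∨ pos_colon < pos_tilde) then
      result ++ [PySem.Str.slice item none (some pos_colon)]
    else if pos_tilde ≠ -1 then
      result ++ [PySem.Str.slice item none (some pos_tilde)]
    else
      result ++ [item]) []

-- ===== PORT B =====
-- inner loop of B: collect characters until the first ':' or '~' (break)
def pvPrefixChars : List Char → List Char
  | [] => []
  | c :: cs => if c = ':' ∨ c = '~' then [] else c :: pvPrefixChars cs

def extract_before_delimiters_alt (input_list : List String) : List String :=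
  input_list.foldl (fun result item =>
    result ++ [String.ofList (pvPrefixChars item.toList)]) []

-- ===== PRECONDITION & SPEC =====
def Spec_extract_before_delimiters (input_list : List String) (out : List String) : Prop := out = extract_before_delimiters_alt input_list
instance (input_list : List String) (out : List String) : Decidable (Spec_extract_before_delimiters input_list out) := by unfold Spec_extract_before_delimiters; infer_instance

-- ===== CLAIM (what is proved, stated in full; the proofs are below) =====
def Claim_equal_extract_before_delimiters : Prop := ∀ (input_list : List String), Dom_extract_before_delimiters input_list → Spec_extract_before_delimiters input_list (extract_before_delimiters input_list)

-- ===== LEMMAS AND PROOFS =====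

lemma singleton_infix_iff_mem (c : Char) (l : List Char) : [c] <:+: l ↔ c ∈ l := by
  constructor
  · rintro ⟨u, v, rfl⟩; simp
  · intro h; obtain ⟨u, v, rfl⟩ := List.append_of_mem h
    exact ⟨u, v, by simp⟩

lemma singleton_prefix_iff (c : Char) (l : List Char) : [c] <+: l ↔ l[0]? = some c := by
  cases l with
  | nil => simp
  | cons a t =>
    constructor
    · rintro ⟨v, hv⟩; simp_all
    · intro h; simp at h; subst h; exact ⟨t, rfl⟩

-- first-occurrence facts for a single-character needle, from Chars.find_spec
lemma find_single_at (cs : List Char) (c : Char) (h : PySem.Chars.find cs [c] ≠ -1) :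
    cs[(PySem.Chars.find cs [c]).toNat]? = some c ∧
    ∀ i < (PySem.Chars.find cs [c]).toNat, cs[i]? ≠ some c := by
  have h0 : 0 ≤ PySem.Chars.find cs [c] := by
    have := PySem.Chars.neg_one_le_find cs [c]; omega
  obtain ⟨h1, h2⟩ := PySem.Chars.find_spec h0
  refine ⟨?_, ?_⟩
  · have := (singleton_prefix_iff c _).mp h1
    simpa [List.head?_drop] using this
  · intro i hi hc
    exact h2 i hi ((singleton_prefix_iff c _).mpr (by simpa [List.head?_drop] using hc))

lemma find_none_not_mem (cs : List Char) (c : Char) (h : PySem.Chars.find cs [c] = -1) :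
    c ∉ cs := by
  have := (PySem.Chars.find_eq_neg_one_iff _ _).mp h
  exact fun hm => this ((singleton_infix_iff_mem c cs).mpr hm)

-- B's break-loop computes a prefix: characterisation as List.take
lemma pvPrefixChars_eq_take (cs : List Char) (n : Nat) (hn : n ≤ cs.length)
    (hgood : ∀ i < n, ∀ c, cs[i]? = some c → ¬(c = ':' ∨ c = '~'))
    (hstop : n = cs.length ∨ ∃ c, cs[n]? = some c ∧ (c = ':' ∨ c = '~')) :
    pvPrefixChars cs = cs.take n := by
  induction cs generalizing n with
  | nil => simp [pvPrefixChars]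
  | cons a t ih =>
    cases n with
    | zero =>
      rcases hstop with h | ⟨c, hc, hd⟩
      · simp at h
      · simp at hc; subst hc
        simp [pvPrefixChars, hd]
    | succ m =>
      have ha : ¬(a = ':' ∨ a = '~') := hgood 0 (Nat.succ_pos m) a rfl
      simp only [pvPrefixChars, if_neg ha, List.take_succ_cons]
      congr 1
      refine ih m (by simpa using hn) ?_ ?_
      · intro i hi c hc
        exact hgood (i + 1) (by omega) c (by simpa using hc)
      · rcases hstop with h | ⟨c, hc, hd⟩
        · left; simpa using h
        · right; exact ⟨c, by simpa using hc, hd⟩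

-- the per-item equality: A's branch logic = B's single scan
lemma item_eq (item : String) :
    (if PySem.Str.find item ":" ≠ -1 ∧ (PySem.Str.find item "~" = -1 ∨ PySem.Str.find item ":" < PySem.Str.find item "~") then
       PySem.Str.slice item none (some (PySem.Str.find item ":"))
     else if PySem.Str.find item "~" ≠ -1 then
       PySem.Str.slice item none (some (PySem.Str.find item "~"))
     else item)
    = String.ofList (pvPrefixChars item.toList) := by
  set cs := item.toList with hcs
  have hfc : PySem.Str.find item ":" = PySem.Chars.find cs [':'] := by simp [hcs]
  have hft : PySem.Str.find item "~" = PySem.Chars.find cs ['~'] := by simp [hcs]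
  simp only [hfc, hft]
  set pc := PySem.Chars.find cs [':'] with hpc
  set pt := PySem.Chars.find cs ['~'] with hpt
  have hpc_le : pc ≤ cs.length := PySem.Chars.find_le_length cs [':']
  have hpt_le : pt ≤ cs.length := PySem.Chars.find_le_length cs ['~']
  by_cases h1 : pc ≠ -1 ∧ (pt = -1 ∨ pc < pt)
  · -- colon branch
    rw [if_pos h1]
    obtain ⟨hc, hor⟩ := h1
    have hc0 : 0 ≤ pc := by have := PySem.Chars.neg_one_le_find cs [':']; omega
    obtain ⟨hat, hmin⟩ := find_single_at cs ':' hc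
    have hprefix : pvPrefixChars cs = cs.take pc.toNat := by
      refine pvPrefixChars_eq_take cs pc.toNat (by omega) ?_ (Or.inr ⟨':', hat, Or.inl rfl⟩)
      intro i hi c hci hbad
      rcases hbad with rfl | rfl
      · exact hmin i hi hci
      · rcases hor with ht | hlt
        · exact find_none_not_mem cs '~' ht (List.mem_of_getElem? hci)
        · have ht0 : 0 ≤ pt := by omega
          have ht' : pt ≠ -1 := by omega
          obtain ⟨_, hmint⟩ := find_single_at cs '~' ht'
          exact hmint i (by omega) hci
    apply String.toList_injective
    simp [PySem.Str.toList_slice, PySem.List.slice_to _ hc0]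
    rw [← hcs, hprefix]
  · rw [if_neg h1]
    by_cases h2 : pt ≠ -1
    · -- tilde branch
      rw [if_pos h2]
      have ht0 : 0 ≤ pt := by have := PySem.Chars.neg_one_le_find cs ['~']; omega
      obtain ⟨hat, hmin⟩ := find_single_at cs '~' h2
      have hor : pc = -1 ∨ pt ≤ pc := by
        by_cases hc : pc = -1
        · exact Or.inl hc
        · right
          have h' : ¬(pt = -1 ∨ pc < pt) := fun hh => h1 ⟨hc, hh⟩
          omega
      have hprefix : pvPrefixChars cs = cs.take pt.toNat := by
        refine pvPrefixChars_eq_take cs pt.toNat (by omega) ?_ (Or.inr ⟨'~', hat, Or.inr rfl⟩)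
        intro i hi c hci hbad
        rcases hbad with rfl | rfl
        · rcases hor with hcn | hle
          · exact find_none_not_mem cs ':' hcn (List.mem_of_getElem? hci)
          · have hc0 : 0 ≤ pc := by omega
            have hc' : pc ≠ -1 := by omega
            obtain ⟨_, hminc⟩ := find_single_at cs ':' hc'
            exact hminc i (by omega) hci
        · exact hmin i hi hci
      apply String.toList_injective
      simp [PySem.Str.toList_slice, PySem.List.slice_to _ ht0]
      rw [← hcs, hprefix]
    · -- neither delimiter occurs
      rw [if_neg h2]
      have hc : pc = -1 := by
        by_contra hc
        exact h1 ⟨hc, Or.inl (not_not.mp h2)⟩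
      have hnc := find_none_not_mem cs ':' hc
      have hnt := find_none_not_mem cs '~' (not_not.mp h2)
      have hprefix : pvPrefixChars cs = cs := by
        have := pvPrefixChars_eq_take cs cs.length le_rfl
          (fun i hi c hci hbad => by
            rcases hbad with rfl | rfl
            · exact hnc (List.mem_of_getElem? hci)
            · exact hnt (List.mem_of_getElem? hci))
          (Or.inl rfl)
        simpa using this
      apply String.toList_injective
      simp only [String.toList_ofList]
      rw [← hcs, hprefix]

-- fold the per-item equality through the two foldl loops
lemma folds_eq (input_list : List String) (acc : List String) :
    input_list.foldl (fun result item =>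
      let pos_colon := PySem.Str.find item ":"
      let pos_tilde := PySem.Str.find item "~"
      if pos_colon ≠ -1 ∧ (pos_tilde = -1 ∨ pos_colon < pos_tilde) then
        result ++ [PySem.Str.slice item none (some pos_colon)]
      else if pos_tilde ≠ -1 then
        result ++ [PySem.Str.slice item none (some pos_tilde)]
      else
        result ++ [item]) acc
    = input_list.foldl (fun result item =>
        result ++ [String.ofList (pvPrefixChars item.toList)]) acc := by
  induction input_list generalizing acc with
  | nil => rfl
  | cons x xs ih =>
    simp only [List.foldl_cons]
    rw [← ih]
    have h := item_eq x
    split_ifs at h ⊢ with ha hb <;> rw [← h]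

-- ===== VERDICT (by name: the statement is the Claim_ definition above) =====
theorem extract_before_delimiters_spec : Claim_equal_extract_before_delimiters := by
  intro input_list _
  unfold Spec_extract_before_delimiters extract_before_delimiters extract_before_delimiters_alt
  exact folds_eq input_list []
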